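-- pv_equiv track=rewrite | github.com/cybereason-labs/owLSM | Rules/RulesGenerator/sigma_rule_loader.py | get_unescaped_wildcard_positions
-- ===== SOURCE A (Python) =====
-- def get_unescaped_wildcard_positions(value: str) -> list:
--     positions = []
--     i = 0
--     while i < len(value):
--         char = value[i]
--         if char == '\\' and i + 1 < len(value):
--             i += 2
--             continue
--         if char in ('*', '?'):
--             positions.append((i, char))
--         i += 1
--     return positions
-- ===== SOURCE B (Python) =====
-- def get_unescaped_wildcard_positions(value: str) -> list:
--     # Split on backslashes; segments carry no backslash, so wildcard hits are
--     # pure position arithmetic; a 0/1 skip tracks whether the separator before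
--     # a segment escaped its first char (or, on an empty segment, the next separator).
--     positions = []
--     pos = 0
--     skip = 0
--     for part in value.split('\\'):
--         for j, ch in enumerate(part[skip:], skip):
--             if ch in ('*', '?'):
--                 positions.append((pos + j, ch))
--         skip = 0 if (skip == 1 and part == '') else 1
--         pos += len(part) + 1
--     return positions
-- ===== Notes on version B (the rewrite author's own statement) =====
-- stated objective: faster
-- what changed: Instead of one char-by-char scan that jumps the index past escapes, B splits the string on backslashes and finds wildcards inside the backslash-free segments by position arithmetic, with a 0/1 skip recording whether the separator before a segment escaped its first char (or the next separator).
import Mathlib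
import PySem

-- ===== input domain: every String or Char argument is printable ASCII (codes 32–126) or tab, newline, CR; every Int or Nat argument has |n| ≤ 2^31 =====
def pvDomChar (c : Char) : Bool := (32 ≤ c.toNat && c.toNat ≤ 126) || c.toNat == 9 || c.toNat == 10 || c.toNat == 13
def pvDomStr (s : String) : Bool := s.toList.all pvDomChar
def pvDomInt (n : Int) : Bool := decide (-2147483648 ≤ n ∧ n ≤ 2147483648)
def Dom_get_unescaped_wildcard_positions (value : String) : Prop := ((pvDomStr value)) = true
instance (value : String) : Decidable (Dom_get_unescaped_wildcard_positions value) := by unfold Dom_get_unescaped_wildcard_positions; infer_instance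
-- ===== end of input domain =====

-- B replaces A's index-jumping while loop by splitting the string on backslashes and
-- locating wildcards inside the backslash-free segments by position arithmetic (objective: alternative).


-- ===== PORT A =====
-- A's while loop: index i steps by 2 past a backslash (when a next char exists), by 1 otherwise.
def pvLoopA (s : List Char) (i : Nat) : List (Int × String) :=
  if h : i < s.length then
    let c := s[i]
    if c = '\\' ∧ i + 1 < s.length then
      pvLoopA s (i + 2)
    else if c = '*' ∨ c = '?' then
      ((i : Int), String.ofList [c]) :: pvLoopA s (i + 1)
    else
      pvLoopA s (i + 1)
  else []
termination_by s.length - i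

def get_unescaped_wildcard_positions (value : String) : List (Int × String) :=
  pvLoopA value.toList 0

-- ===== PORT B =====
-- B's inner loop: scan a (backslash-free) segment from index `skip`, emitting wildcards.
def pvEmit (part : List Char) (pos : Nat) : List (Int × String) :=
  match part with
  | [] => []
  | c :: rest =>
    (if c = '*' ∨ c = '?' then [((pos : Int), String.ofList [c])] else []) ++ pvEmit rest (pos + 1)

-- B's outer loop over the segments produced by value.split('\\'), threading (pos, skip).
def pvLoopB (parts : List (List Char)) (pos : Nat) (skip : Nat) : List (Int × String) :=
  match parts with
  | [] => []
  | part :: rest =>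
    pvEmit (part.drop skip) (pos + skip) ++
      pvLoopB rest (pos + part.length + 1) (if skip = 1 ∧ part = [] then 0 else 1)

def get_unescaped_wildcard_positions_alt (value : String) : List (Int × String) :=
  pvLoopB (value.toList.splitOn '\\') 0 0

-- ===== PRECONDITION & SPEC =====
def Spec_get_unescaped_wildcard_positions (value : String) (out : List (Int × String)) : Prop := out = get_unescaped_wildcard_positions_alt value
instance (value : String) (out : List (Int × String)) : Decidable (Spec_get_unescaped_wildcard_positions value out) := by unfold Spec_get_unescaped_wildcard_positions; infer_instance

-- ===== CLAIM (what is proved, stated in full; the proofs are below) =====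
def Claim_equal_get_unescaped_wildcard_positions : Prop := ∀ (value : String), Dom_get_unescaped_wildcard_positions value → Spec_get_unescaped_wildcard_positions value (get_unescaped_wildcard_positions value)

-- ===== LEMMAS AND PROOFS =====

-- Proof-side intermediate: A's scan rephrased structurally with an `escaped` flag.
def pvFlag (s : List Char) (i : Nat) (escaped : Bool) : List (Int × String) :=
  match s with
  | [] => []
  | c :: rest =>
    if escaped then pvFlag rest (i + 1) false
    else if c = '\\' then pvFlag rest (i + 1) true
    else if c = '*' ∨ c = '?' then
      ((i : Int), String.ofList [c]) :: pvFlag rest (i + 1) false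
    else pvFlag rest (i + 1) false

theorem pvLoop_key (s : List Char) : ∀ (k i : Nat), s.length - i ≤ k →
    pvLoopA s i = pvFlag (s.drop i) i false := by
  intro k
  induction k with
  | zero =>
    intro i hk
    have hi : s.length ≤ i := by omega
    rw [pvLoopA, dif_neg (by omega), List.drop_eq_nil_of_le hi, pvFlag]
  | succ k ih =>
    intro i hk
    by_cases h : i < s.length
    · have hdrop : s.drop i = s[i] :: s.drop (i + 1) := List.drop_eq_getElem_cons h
      rw [pvLoopA, dif_pos h, hdrop, pvFlag]
      simp only [if_neg Bool.false_ne_true]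
      by_cases hb : s[i] = '\\'
      · rw [if_pos hb]
        by_cases h1 : i + 1 < s.length
        · rw [if_pos ⟨hb, h1⟩]
          have hdrop1 : s.drop (i + 1) = s[i + 1] :: s.drop (i + 2) :=
            List.drop_eq_getElem_cons h1
          rw [hdrop1, pvFlag, if_pos rfl]
          exact ih (i + 2) (by omega)
        · rw [if_neg (by tauto)]
          have hw : ¬ (s[i] = '*' ∨ s[i] = '?') := by
            rw [hb]; decide
          rw [if_neg hw]
          have hnil : s.drop (i + 1) = [] := List.drop_eq_nil_of_le (by omega)
          rw [hnil, pvFlag]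
          rw [pvLoopA, dif_neg (by omega)]
      · rw [if_neg (by tauto), if_neg hb]
        by_cases hw : s[i] = '*' ∨ s[i] = '?'
        · rw [if_pos hw, if_pos hw]
          exact congrArg _ (ih (i + 1) (by omega))
        · rw [if_neg hw, if_neg hw]
          exact ih (i + 1) (by omega)
    · rw [pvLoopA, dif_neg h, List.drop_eq_nil_of_le (by omega), pvFlag]

-- The flag scanner equals B's split-based scanner, in both escape states.
theorem pvFlag_split (s : List Char) : ∀ (pos : Nat),
    pvFlag s pos false = pvLoopB (s.splitOn '\\') pos 0 ∧
    pvFlag s pos true = pvLoopB (s.splitOn '\\') pos 1 := by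
  induction s with
  | nil =>
    intro pos
    constructor <;> simp [List.splitOn, List.splitOnP_nil, pvFlag, pvLoopB, pvEmit]
  | cons c s ih =>
    intro pos
    by_cases hb : c = '\\'
    · subst hb
      have hsplit : (('\\' :: s).splitOn '\\') = [] :: s.splitOn '\\' := by
        simp [List.splitOn, List.splitOnP_cons]
      rw [hsplit]
      constructor
      · rw [pvFlag, pvLoopB]
        simp [pvEmit, (ih (pos + 1)).2]
      · rw [pvFlag, pvLoopB]
        simp [pvEmit, (ih (pos + 1)).1]
    · obtain ⟨h, t, hht⟩ : ∃ h t, s.splitOn '\\' = h :: t := by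
        cases hs : s.splitOn '\\' with
        | nil => exact absurd hs (List.splitOnP_ne_nil _ _)
        | cons h t => exact ⟨h, t, rfl⟩
      have hsplit : ((c :: s).splitOn '\\') = (c :: h) :: t := by
        simp only [List.splitOn, List.splitOnP_cons, beq_iff_eq]
        rw [if_neg hb]
        have hh : s.splitOnP (· == '\\') = h :: t := hht
        rw [hh]; rfl
      rw [hsplit]
      have hre : pvFlag s (pos + 1) false = pvEmit h (pos + 1) ++ pvLoopB t (pos + 1 + h.length + 1) 1 := by
        rw [(ih (pos + 1)).1, hht, pvLoopB]
        simp
      have harith : pos + (h.length + 1) + 1 = pos + 1 + h.length + 1 := by omega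
      constructor
      · rw [pvFlag, pvLoopB]
        by_cases hw : c = '*' ∨ c = '?'
        · simp only [if_neg Bool.false_ne_true, if_neg hb, pvEmit, if_pos hw,
            List.drop_zero, Nat.add_zero, List.length_cons, hre, harith]
          simp
        · simp only [if_neg Bool.false_ne_true, if_neg hb, pvEmit, if_neg hw,
            List.drop_zero, Nat.add_zero, List.length_cons, hre, harith]
          simp
      · rw [pvFlag, pvLoopB]
        simp only [List.drop_succ_cons, List.drop_zero, List.length_cons, hre, harith]
        simp

-- ===== VERDICT (by name: the statement is the Claim_ definition above) =====
theorem get_unescaped_wildcard_positions_spec : Claim_equal_get_unescaped_wildcard_positions := by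
  intro value _
  unfold Spec_get_unescaped_wildcard_positions get_unescaped_wildcard_positions get_unescaped_wildcard_positions_alt
  rw [pvLoop_key value.toList value.toList.length 0 (by omega)]
  simpa using (pvFlag_split value.toList 0).1
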